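-- pv_equiv track=rewrite | github.com/abhisheksharm-3/poetica | server/src/services/formatter.py | format_sonnet
-- ===== SOURCE A (Python) =====
-- from typing import List
--
-- def format_sonnet(text: str) -> List[str]:
--     """Format text as sonnet (14 lines, ~10 words per line)."""
--     words = text.split()
--     lines: List[str] = []
--     current_line: List[str] = []
--     target_line_length = 10
--
--     for word in words:
--         if len(lines) >= 14:
--             break
--
--         current_line.append(word)
--         if len(current_line) >= target_line_length:
--             lines.append(" ".join(current_line))
--             current_line = []
--
--     if current_line and len(lines) < 14:
--         lines.append(" ".join(current_line))
--
--     return lines[:14]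
-- ===== SOURCE B (Python) =====
-- from typing import List
--
-- def format_sonnet(text: str) -> List[str]:
--     """Format text as sonnet: recursively slice off 10-word chunks, up to 14 lines."""
--     def chunk(words: List[str], remaining: int) -> List[str]:
--         if not words or remaining == 0:
--             return []
--         return [" ".join(words[:10])] + chunk(words[10:], remaining - 1)
--     return chunk(text.split(), 14)
-- ===== Notes on version B (the rewrite author's own statement) =====
-- stated objective: simpler
-- what changed: Replaced the per-word accumulator loop with mid-loop break and trailing-flush special case by a recursive decomposition that slices off one 10-word chunk per call, bounded by a remaining-lines counter of 14.
import Mathlib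
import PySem

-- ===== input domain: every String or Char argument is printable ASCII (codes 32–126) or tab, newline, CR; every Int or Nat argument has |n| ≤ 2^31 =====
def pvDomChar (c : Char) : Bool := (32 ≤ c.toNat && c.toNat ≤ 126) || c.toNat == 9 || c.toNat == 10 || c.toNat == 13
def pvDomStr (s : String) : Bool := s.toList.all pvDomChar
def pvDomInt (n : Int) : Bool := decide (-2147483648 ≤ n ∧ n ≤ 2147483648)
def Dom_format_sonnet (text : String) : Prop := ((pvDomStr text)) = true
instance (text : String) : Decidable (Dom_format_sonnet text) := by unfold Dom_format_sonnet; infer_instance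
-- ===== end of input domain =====

-- B replaces A's per-word accumulator loop (with break and trailing flush) by a recursive
-- 10-word chunk slicer bounded by a remaining-lines counter; objective: simpler.

-- ===== PORT A =====
-- the 'for word in words' loop over state (lines, current_line), with the break and the post-loop flush
def pvALoop (ws : List String) (lines : List String) (cur : List String) : List String :=
  match ws with
  | [] => if cur ≠ [] ∧ lines.length < 14 then lines ++ [PySem.Str.join " " cur] else lines
  | w :: rest =>
    if lines.length ≥ 14 then
      -- break; post-loop flush (its guard is false here since len(lines) ≥ 14)
      if cur ≠ [] ∧ lines.length < 14 then lines ++ [PySem.Str.join " " cur] else lines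
    else
      if (cur ++ [w]).length ≥ 10 then pvALoop rest (lines ++ [PySem.Str.join " " (cur ++ [w])]) []
      else pvALoop rest lines (cur ++ [w])

def format_sonnet (text : String) : List String :=
  PySem.List.slice (pvALoop (PySem.Str.split₀ text) [] []) none (some 14)

-- ===== PORT B =====
def pvChunk (ws : List String) (remaining : Nat) : List String :=
  match remaining with
  | 0 => []
  | r + 1 =>
    match ws with
    | [] => []
    | _ :: _ =>
      PySem.Str.join " " (PySem.List.slice ws none (some 10)) ::
        pvChunk (PySem.List.slice ws (some 10) none) r

def format_sonnet_alt (text : String) : List String :=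
  pvChunk (PySem.Str.split₀ text) 14

-- ===== PRECONDITION & SPEC =====
def Spec_format_sonnet (text : String) (out : List String) : Prop := out = format_sonnet_alt text
instance (text : String) (out : List String) : Decidable (Spec_format_sonnet text out) := by unfold Spec_format_sonnet; infer_instance

-- ===== CLAIM (what is proved, stated in full; the proofs are below) =====
def Claim_equal_format_sonnet : Prop := ∀ (text : String), Dom_format_sonnet text → Spec_format_sonnet text (format_sonnet text)

-- ===== LEMMAS AND PROOFS =====

theorem pvChunk_nil (r : Nat) : pvChunk [] r = [] := by
  cases r <;> simp [pvChunk]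

theorem pvChunk_length_le (ws : List String) (r : Nat) : (pvChunk ws r).length ≤ r := by
  induction r generalizing ws with
  | zero => simp [pvChunk]
  | succ r ih =>
    cases ws with
    | nil => simp [pvChunk]
    | cons w rest =>
      simp only [pvChunk, List.length_cons]
      exact Nat.succ_le_succ (ih _)

-- one pvChunk step on a nonempty list, with the slices rewritten to take/drop
theorem pvChunk_cons (ws : List String) (hws : ws ≠ []) (r : Nat) :
    pvChunk ws (r + 1) = PySem.Str.join " " (ws.take 10) :: pvChunk (ws.drop 10) r := by
  cases ws with
  | nil => exact absurd rfl hws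
  | cons w rest =>
    simp only [pvChunk]
    rw [PySem.List.slice_to _ (by norm_num), PySem.List.slice_from _ (by norm_num)]
    rfl

theorem pvALoop_eq_chunk (ws lines cur : List String)
    (hcur : cur.length < 10) (hlines : lines.length ≤ 14) :
    pvALoop ws lines cur = lines ++ pvChunk (cur ++ ws) (14 - lines.length) := by
  induction ws generalizing lines cur with
  | nil =>
    simp only [pvALoop, List.append_nil]
    split_ifs with h
    · obtain ⟨hc, hl⟩ := h
      obtain ⟨r, hr⟩ : ∃ r, 14 - lines.length = r + 1 := ⟨13 - lines.length, by omega⟩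
      rw [hr, pvChunk_cons cur hc r,
          List.take_of_length_le (Nat.le_of_lt hcur),
          List.drop_eq_nil_of_le (Nat.le_of_lt hcur), pvChunk_nil]
    · by_cases hc : cur = []
      · simp [hc, pvChunk_nil]
      · have h0 : 14 - lines.length = 0 := by
          rcases not_and_or.mp h with h' | h'
          · exact absurd hc (by simpa using h')
          · omega
        simp [h0, pvChunk]
  | cons w rest ih =>
    by_cases h1 : lines.length ≥ 14
    · have h0 : 14 - lines.length = 0 := by omega
      have hflush : ¬(cur ≠ [] ∧ lines.length < 14) := fun h => absurd h.2 (by omega)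
      simp only [pvALoop, if_pos h1, if_neg hflush, h0, pvChunk]
      simp
    · by_cases h2 : (cur ++ [w]).length ≥ 10
      · have hstep : pvALoop (w :: rest) lines cur
            = pvALoop rest (lines ++ [PySem.Str.join " " (cur ++ [w])]) [] := by
          simp only [pvALoop]; rw [if_neg h1, if_pos h2]
        rw [hstep, ih (lines ++ [PySem.Str.join " " (cur ++ [w])]) [] (by norm_num)
              (by simp; omega)]
        have hlen10 : (cur ++ [w]).length = 10 := by simp at h2 ⊢; omega
        obtain ⟨r, hr⟩ : ∃ r, 14 - lines.length = r + 1 := ⟨13 - lines.length, by omega⟩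
        have hassoc : cur ++ w :: rest = (cur ++ [w]) ++ rest := by simp
        rw [hassoc, hr, pvChunk_cons _ (by simp) r,
            show (10 : Nat) = (cur ++ [w]).length from hlen10.symm,
            List.take_left, List.drop_left]
        have hr' : 14 - (lines ++ [PySem.Str.join " " (cur ++ [w])]).length = r := by
          simp; omega
        rw [hr']
        simp
      · have hstep : pvALoop (w :: rest) lines cur = pvALoop rest lines (cur ++ [w]) := by
          simp only [pvALoop]; rw [if_neg h1, if_neg h2]
        rw [hstep, ih lines (cur ++ [w]) (by simp at h2 ⊢; omega) hlines]
        simp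

-- ===== VERDICT (by name: the statement is the Claim_ definition above) =====
theorem format_sonnet_spec : Claim_equal_format_sonnet := by
  intro text _
  unfold Spec_format_sonnet format_sonnet format_sonnet_alt
  rw [pvALoop_eq_chunk (PySem.Str.split₀ text) [] [] (by norm_num) (by norm_num)]
  simp only [List.length_nil, Nat.sub_zero, List.nil_append]
  rw [PySem.List.slice_to _ (by norm_num)]
  exact List.take_of_length_le (le_trans (pvChunk_length_le _ _) (by norm_num))
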